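-- pv_equiv track=rewrite | github.com/PetrMarketing/davinci-autoeditor | utils/srt_parser.py | invert_regions
-- ===== SOURCE A (Python) =====
-- from typing import List, Optional
--
-- def invert_regions(delete_regions: List[tuple], total_duration_ms: int) -> List[tuple]:
--     """Преобразовать регионы удаления в регионы сохранения в диапазоне 0..total_duration_ms."""
--     if not delete_regions:
--         return [(0, total_duration_ms)]
--
--     keep = []
--     prev_end = 0
--     for start, end in sorted(delete_regions, key=lambda r: r[0]):
--         if start > prev_end:
--             keep.append((prev_end, start))
--         prev_end = max(prev_end, end)
--
--     if prev_end < total_duration_ms: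
--         keep.append((prev_end, total_duration_ms))
--
--     return keep
-- ===== SOURCE B (Python) =====
-- def invert_regions(delete_regions, total_duration_ms):
--     """Recursive rewrite: walk the sorted regions with the running max of ends,
--     consing each gap at the front and emitting the final tail in the base case."""
--     if not delete_regions:
--         return [(0, total_duration_ms)]
--
--     def keep_after(regs, m):
--         if not regs:
--             return [(m, total_duration_ms)] if m < total_duration_ms else []
--         (s, e) = regs[0]
--         tail = keep_after(regs[1:], max(m, e))
--         return [(m, s)] + tail if s > m else tail
--
--     return keep_after(sorted(delete_regions, key=lambda r: r[0]), 0)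
-- ===== Notes on version B (the rewrite author's own statement) =====
-- stated objective: alternative
-- what changed: Replaces A's imperative accumulator loop with list appends and a post-loop tail check by a recursive function over the sorted regions that threads the running max, conses each gap at the front, and emits the final tail interval in its base case.
import Mathlib
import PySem

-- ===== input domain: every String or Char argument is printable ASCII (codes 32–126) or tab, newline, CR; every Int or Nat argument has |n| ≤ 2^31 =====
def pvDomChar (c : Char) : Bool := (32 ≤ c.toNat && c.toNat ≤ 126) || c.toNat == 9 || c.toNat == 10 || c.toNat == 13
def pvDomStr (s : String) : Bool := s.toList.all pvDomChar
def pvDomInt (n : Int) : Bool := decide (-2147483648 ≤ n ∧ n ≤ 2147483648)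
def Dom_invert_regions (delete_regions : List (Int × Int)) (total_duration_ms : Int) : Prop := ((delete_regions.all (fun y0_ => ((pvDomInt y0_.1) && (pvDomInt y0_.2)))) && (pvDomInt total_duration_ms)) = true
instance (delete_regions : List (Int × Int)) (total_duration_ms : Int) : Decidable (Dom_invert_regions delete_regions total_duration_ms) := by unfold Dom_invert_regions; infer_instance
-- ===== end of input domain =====

-- B replaces A's accumulator loop + post-loop tail with a recursion over the sorted regions whose base case emits the tail (alternative decomposition, same cost).


-- ===== PORT A =====
def invert_regions (delete_regions : List (Int × Int)) (total_duration_ms : Int) : List (Int × Int) :=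
  if delete_regions = [] then [(0, total_duration_ms)]
  else
    let st := (PySem.List.sorted delete_regions (fun r => r.1)).foldl
      (fun (acc : List (Int × Int) × Int) r =>
        ((if r.1 > acc.2 then acc.1 ++ [(acc.2, r.1)] else acc.1), max acc.2 r.2))
      ([], 0)
    if st.2 < total_duration_ms then st.1 ++ [(st.2, total_duration_ms)] else st.1

-- ===== PORT B =====
/-- B's inner recursion `keep_after(regs, m)`: gaps above running max `m`, tail in the base case. -/
def pvKeepAfter (regs : List (Int × Int)) (m total : Int) : List (Int × Int) :=
  match regs with
  | [] => if m < total then [(m, total)] else []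
  | (s, e) :: rest =>
    let tail := pvKeepAfter rest (max m e) total
    if s > m then (m, s) :: tail else tail

def invert_regions_alt (delete_regions : List (Int × Int)) (total_duration_ms : Int) : List (Int × Int) :=
  if delete_regions = [] then [(0, total_duration_ms)]
  else pvKeepAfter (PySem.List.sorted delete_regions (fun r => r.1)) 0 total_duration_ms

-- ===== PRECONDITION & SPEC =====
def Spec_invert_regions (delete_regions : List (Int × Int)) (total_duration_ms : Int) (out : List (Int × Int)) : Prop := out = invert_regions_alt delete_regions total_duration_ms
instance (delete_regions : List (Int × Int)) (total_duration_ms : Int) (out : List (Int × Int)) : Decidable (Spec_invert_regions delete_regions total_duration_ms out) := by unfold Spec_invert_regions; infer_instance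

-- ===== CLAIM (what is proved, stated in full; the proofs are below) =====
def Claim_equal_invert_regions : Prop := ∀ (delete_regions : List (Int × Int)) (total_duration_ms : Int), Dom_invert_regions delete_regions total_duration_ms → Spec_invert_regions delete_regions total_duration_ms (invert_regions delete_regions total_duration_ms)

-- ===== LEMMAS AND PROOFS =====

/-- A's fold unfolded: starting from accumulator `(k, m)` it appends the gap list and
returns the running max of ends. -/
theorem pvFoldA (xs : List (Int × Int)) (k : List (Int × Int)) (m : Int) :
    xs.foldl (fun (acc : List (Int × Int) × Int) r =>
        ((if r.1 > acc.2 then acc.1 ++ [(acc.2, r.1)] else acc.1), max acc.2 r.2)) (k, m)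
      = (k ++ (xs.foldl (fun (acc : List (Int × Int) × Int) r =>
          ((if r.1 > acc.2 then acc.1 ++ [(acc.2, r.1)] else acc.1), max acc.2 r.2)) ([], m)).1,
         (xs.foldl (fun (acc : List (Int × Int) × Int) r =>
          ((if r.1 > acc.2 then acc.1 ++ [(acc.2, r.1)] else acc.1), max acc.2 r.2)) ([], m)).2) := by
  induction xs generalizing k m with
  | nil => simp
  | cons r t ih =>
    simp only [List.foldl_cons]
    rw [ih, ih ((if r.1 > m then [] ++ [(m, r.1)] else []))]
    split <;> simp

/-- B's recursion equals A's fold followed by A's post-loop tail step. -/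
theorem pvKeepAfter_eq_fold (xs : List (Int × Int)) (m total : Int) :
    pvKeepAfter xs m total
      = (let st := xs.foldl (fun (acc : List (Int × Int) × Int) r =>
            ((if r.1 > acc.2 then acc.1 ++ [(acc.2, r.1)] else acc.1), max acc.2 r.2)) ([], m)
         if st.2 < total then st.1 ++ [(st.2, total)] else st.1) := by
  induction xs generalizing m with
  | nil => simp [pvKeepAfter]
  | cons r t ih =>
    simp only [pvKeepAfter, List.foldl_cons]
    rw [ih]
    rw [pvFoldA t ((if r.1 > m then [] ++ [(m, r.1)] else [])) (max m r.2)]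
    split <;> rename_i h <;> simp [h] <;> split <;> simp

-- ===== VERDICT (by name: the statement is the Claim_ definition above) =====
theorem invert_regions_spec : Claim_equal_invert_regions := by
  intro ds total _
  unfold Spec_invert_regions invert_regions invert_regions_alt
  by_cases h : ds = []
  · simp [h]
  · simp only [h, if_false]
    rw [pvKeepAfter_eq_fold]
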